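-- pv_equiv track=rewrite | github.com/Shivansh-Raj/TypingSpeedCalculator | typing_calc.py | mistakes
-- ===== SOURCE A (Python) =====
-- def mistakes(test,user):
--     test = test.split(' ')
--     user_ip = user.split(' ')
--     error =0
--     for i in range(len(user_ip)):
--         try:
--             if (test[i] != user_ip[i]):
--                 error = error +1
--         except:
--             if(user_ip[i]):
--                 error = error + 1
--     return [error,len(user_ip),len(test)]
-- ===== SOURCE B (Python) =====
-- def mistakes(test, user):
--     def walk(t, u):
--         # simultaneous structural recursion over both word lists
--         if not u:
--             return 0
--         if not t:
--             return (1 if u[0] else 0) + walk(t, u[1:])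
--         return (0 if t[0] == u[0] else 1) + walk(t[1:], u[1:])
--     tw = test.split(' ')
--     uw = user.split(' ')
--     return [walk(tw, uw), len(uw), len(tw)]
-- ===== Notes on version B (the rewrite author's own statement) =====
-- stated objective: alternative
-- what changed: Replaces A's indexed loop with try/except IndexError by a recursive simultaneous walk over the two word lists: no indexing, no exception handling, the mismatch count is built by structural recursion on the lists.
import Mathlib
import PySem

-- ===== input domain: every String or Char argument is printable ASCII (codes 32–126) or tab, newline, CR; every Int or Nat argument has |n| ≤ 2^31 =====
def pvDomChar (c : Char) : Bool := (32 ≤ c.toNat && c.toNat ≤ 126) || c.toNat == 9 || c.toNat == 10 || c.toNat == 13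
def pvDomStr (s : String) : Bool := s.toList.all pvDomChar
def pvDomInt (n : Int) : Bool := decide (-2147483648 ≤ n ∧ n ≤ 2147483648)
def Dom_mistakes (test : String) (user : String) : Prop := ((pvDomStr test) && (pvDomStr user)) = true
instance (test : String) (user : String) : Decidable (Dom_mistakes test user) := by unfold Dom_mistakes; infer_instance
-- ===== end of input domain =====

-- B replaces A's indexed loop with try/except by a recursive simultaneous walk over the two word lists: no indexing, no exceptions.

-- ===== PORT A =====
-- loop body of A: try 'test[i] != user_ip[i]' (pyGet? tw i = none is the IndexError on test[i]);
-- the except branch counts a truthy (non-empty) user_ip[i]. user_ip[i] is always in range (i < len).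
def mistakesStep (tw uw : List String) (e : Int) (i : Int) : Int :=
  match PySem.List.pyGet? tw i with
  | some t => if t ≠ PySem.List.pyGetD uw i "" then e + 1 else e
  | none => if PySem.List.pyGetD uw i "" ≠ "" then e + 1 else e

def mistakes (test : String) (user : String) : List Int :=
  let tw := (PySem.Str.split? test " ").getD []   -- sep " " ≠ "", so split? is always some
  let uw := (PySem.Str.split? user " ").getD []
  let error := (PySem.List.pyRange 0 (uw.length : Int) 1).foldl (mistakesStep tw uw) 0
  [error, uw.length, tw.length]

-- ===== PORT B =====
-- structural recursion matching Source B's walk(t, u)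
def mistakesWalk : List String → List String → Int
  | _, [] => 0
  | [], u :: us => (if u ≠ "" then 1 else 0) + mistakesWalk [] us
  | t :: ts, u :: us => (if t = u then 0 else 1) + mistakesWalk ts us

def mistakes_alt (test : String) (user : String) : List Int :=
  let tw := (PySem.Str.split? test " ").getD []
  let uw := (PySem.Str.split? user " ").getD []
  [mistakesWalk tw uw, uw.length, tw.length]

-- ===== PRECONDITION & SPEC =====
def Spec_mistakes (test : String) (user : String) (out : List Int) : Prop := out = mistakes_alt test user
instance (test : String) (user : String) (out : List Int) : Decidable (Spec_mistakes test user out) := by unfold Spec_mistakes; infer_instance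

-- ===== CLAIM (what is proved, stated in full; the proofs are below) =====
def Claim_equal_mistakes : Prop := ∀ (test : String) (user : String), Dom_mistakes test user → Spec_mistakes test user (mistakes test user)

-- ===== LEMMAS AND PROOFS =====

-- A's step at a natural index, in list form
theorem mistakesStep_natCast (tw uw : List String) (e : Int) (k : Nat) :
    mistakesStep tw uw e (k : Int) =
      match tw[k]? with
      | some t => if t ≠ uw.getD k "" then e + 1 else e
      | none => if uw.getD k "" ≠ "" then e + 1 else e := by
  simp [mistakesStep, PySem.List.pyGet?_natCast, PySem.List.pyGetD_natCast]

-- shifting the index by one steps both lists down by one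
theorem mistakesStep_shift (tw : List String) (u : String) (uw : List String)
    (e : Int) (k : Nat) :
    mistakesStep tw (u :: uw) e ((k + 1 : Nat) : Int) = mistakesStep tw.tail uw e (k : Int) := by
  rw [mistakesStep_natCast, mistakesStep_natCast]
  cases tw <;> simp

-- A's fold over range(len(uw)) computes B's recursive walk
theorem mistakes_fold (uw : List String) : ∀ (tw : List String) (e : Int),
    (List.range uw.length).foldl (fun (e : Int) (k : Nat) => mistakesStep tw uw e (k : Int)) e
      = e + mistakesWalk tw uw := by
  induction uw with
  | nil => intro tw e; simp [mistakesWalk]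
  | cons u us ih =>
    intro tw e
    rw [List.length_cons, List.range_succ_eq_map, List.foldl_cons, List.foldl_map]
    have hcong := PySem.List.foldl_congr_mem (l := List.range us.length)
        (init := mistakesStep tw (u :: us) e ((0 : Nat) : Int))
        (f := fun (x : Int) (y : Nat) => mistakesStep tw (u :: us) x ((y.succ : Nat) : Int))
        (g := fun (x : Int) (y : Nat) => mistakesStep tw.tail us x ((y : Nat) : Int))
        (fun acc x _ => mistakesStep_shift tw u us acc x)
    rw [hcong, ih]
    have h0 : mistakesStep tw (u :: us) e ((0 : Nat) : Int)
        = e + (match tw with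
               | [] => if u ≠ "" then (1 : Int) else 0
               | t :: _ => if t = u then 0 else 1) := by
      rw [mistakesStep_natCast]
      cases tw <;> simp <;> split <;> simp_all
    cases tw with
    | nil => rw [h0]; simp [mistakesWalk]; ring
    | cons t ts => rw [h0]; simp [mistakesWalk]; ring

-- ===== VERDICT (by name: the statement is the Claim_ definition above) =====
theorem mistakes_spec : Claim_equal_mistakes := by
  intro test user _
  unfold Spec_mistakes mistakes mistakes_alt
  have hr := PySem.List.pyRange_zero_natCast (((PySem.Str.split? user " ").getD []).length)
  simp only [hr, List.foldl_map]
  rw [mistakes_fold]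
  ring_nf
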